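-- pv_equiv track=rewrite | github.com/fahim-csedu/stt-data-evaluator | stt-data-latex-report/generate_stt_report_latex_llm.py | esc_label
-- ===== SOURCE A (Python) =====
-- def esc_label(s: str) -> str:
--     """Escape text for LaTeX labels - only alphanumeric and safe chars."""
--     if s is None:
--         return ""
--     s = str(s)
--     s = s.replace("\\", "_")
--     s = s.replace("/", "_")
--     s = s.replace(" ", "_")
--     s = s.replace("&", "And")
--     s = s.replace("%", "pct")
--     s = s.replace("$", "dollar")
--     s = s.replace("#", "hash")
--     s = s.replace("{", "")
--     s = s.replace("}", "")
--     s = s.replace("~", "tilde")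
--     s = s.replace("^", "hat")
--     return "".join(c for c in s if c.isalnum() or c in "_-")
-- ===== SOURCE B (Python) =====
-- _ESC_TABLE = {
--     "\\": "_", "/": "_", " ": "_",
--     "&": "And", "%": "pct", "$": "dollar", "#": "hash",
--     "{": "", "}": "",
--     "~": "tilde", "^": "hat",
-- }
--
-- def esc_label(s: str) -> str:
--     """Escape text for LaTeX labels - only alphanumeric and safe chars."""
--     if s is None:
--         return ""
--     s = str(s)
--     pieces = []
--     for c in s:
--         r = _ESC_TABLE.get(c)
--         if r is not None:
--             pieces.append(r)
--         elif c.isalnum() or c in "_-":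
--             pieces.append(c)
--     return "".join(pieces)
-- ===== Notes on version B (the rewrite author's own statement) =====
-- stated objective: idiomatic
-- what changed: Replaces A's 11 sequential whole-string .replace passes plus a final filter pass by a single table-driven pass that maps each character through a replacement dict or keeps/drops it.
import Mathlib
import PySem

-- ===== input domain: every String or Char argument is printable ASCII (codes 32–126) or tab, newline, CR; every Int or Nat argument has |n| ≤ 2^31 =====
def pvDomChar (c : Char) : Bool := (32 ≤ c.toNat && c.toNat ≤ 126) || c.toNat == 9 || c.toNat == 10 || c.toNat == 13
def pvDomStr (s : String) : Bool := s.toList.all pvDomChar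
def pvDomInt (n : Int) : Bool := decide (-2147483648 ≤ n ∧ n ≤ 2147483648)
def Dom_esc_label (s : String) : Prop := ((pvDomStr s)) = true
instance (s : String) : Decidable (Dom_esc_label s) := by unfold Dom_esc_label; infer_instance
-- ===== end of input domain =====

-- B replaces A's 11 chained .replace scans + final filter scan by one table-driven pass (idiomatic; same result).
-- The Python None-guard is unreachable under the String type and is not ported.

-- ===== PORT A =====
def esc_label (s : String) : String :=
  let s1 := PySem.Str.replace s "\\" "_"
  let s2 := PySem.Str.replace s1 "/" "_"
  let s3 := PySem.Str.replace s2 " " "_"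
  let s4 := PySem.Str.replace s3 "&" "And"
  let s5 := PySem.Str.replace s4 "%" "pct"
  let s6 := PySem.Str.replace s5 "$" "dollar"
  let s7 := PySem.Str.replace s6 "#" "hash"
  let s8 := PySem.Str.replace s7 "{" ""
  let s9 := PySem.Str.replace s8 "}" ""
  let s10 := PySem.Str.replace s9 "~" "tilde"
  let s11 := PySem.Str.replace s10 "^" "hat"
  PySem.Str.join ""
    ((s11.toList.filter
        (fun c => PySem.Chars.isalnum c || PySem.Chars.isIn [c] ['_', '-'])).map
      (fun c => String.ofList [c]))

-- ===== PORT B =====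
def escTable : PySem.Dict Char String :=
  PySem.Dict.ofList
    [('\\', "_"), ('/', "_"), (' ', "_"), ('&', "And"), ('%', "pct"),
     ('$', "dollar"), ('#', "hash"), ('{', ""), ('}', ""), ('~', "tilde"), ('^', "hat")]

def esc_label_alt (s : String) : String :=
  let pieces := s.toList.foldl
    (fun acc c =>
      match escTable.get? c with
      | some r => acc ++ [r]
      | none =>
        if PySem.Chars.isalnum c || PySem.Chars.isIn [c] ['_', '-'] then acc ++ [String.ofList [c]]
        else acc) []
  PySem.Str.join "" pieces

-- ===== PRECONDITION & SPEC =====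
def Spec_esc_label (s : String) (out : String) : Prop := out = esc_label_alt s
instance (s : String) (out : String) : Decidable (Spec_esc_label s out) := by unfold Spec_esc_label; infer_instance

-- ===== CLAIM (what is proved, stated in full; the proofs are below) =====
def Claim_equal_esc_label : Prop := ∀ (s : String), Dom_esc_label s → Spec_esc_label s (esc_label s)

-- ===== LEMMAS AND PROOFS =====

-- replace with a one-char pattern acts independently on every character
theorem pv_go_single (c : Char) (new : List Char) :
    ∀ (l : List Char) (fuel : Nat) (acc : List Char), l.length ≤ fuel →
    PySem.Chars.replace.go [c] new fuel l acc
      = acc.reverse ++ l.flatMap (fun x => if x = c then new else [x]) := by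
  intro l
  induction l with
  | nil => intro fuel acc _; cases fuel <;> simp [PySem.Chars.replace.go]
  | cons h t ih =>
    intro fuel acc hle
    cases fuel with
    | zero => simp at hle
    | succ n =>
      simp only [PySem.Chars.replace.go]
      by_cases hc : h = c
      · subst hc
        simp only [List.isPrefixOf, BEq.rfl, Bool.true_and, if_pos]
        rw [show List.drop (List.length [h]) (h :: t) = t from rfl]
        rw [ih n (new.reverse ++ acc) (by simpa using hle)]
        simp
      · have : [c].isPrefixOf (h :: t) = false := by
          simp [List.isPrefixOf]; exact fun hh => hc hh.symm
        rw [if_neg (by simp [this])]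
        rw [ih n (h :: acc) (by simpa using hle)]
        simp [hc]

theorem pv_replace_single (cs : List Char) (c : Char) (new : List Char) :
    PySem.Chars.replace cs [c] new = cs.flatMap (fun x => if x = c then new else [x]) := by
  simp [PySem.Chars.replace]
  rw [pv_go_single c new cs cs.length [] le_rfl]
  simp

theorem pv_join_nil_flatten (ls : List (List Char)) :
    PySem.Chars.join [] ls = ls.flatten := by
  induction ls with
  | nil => simp [PySem.Chars.join_nil]
  | cons p rest ih =>
    cases rest with
    | nil => simp [PySem.Chars.join_singleton]
    | cons q r => rw [PySem.Chars.join_cons_cons]; simp_all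

-- per-character effect of A's replace chain followed by the filter
def pvKeep (c : Char) : Bool := PySem.Chars.isalnum c || PySem.Chars.isIn [c] ['_', '-']

def pvRep (c : Char) (new : List Char) : List Char → List Char :=
  fun l => l.flatMap (fun x => if x = c then new else [x])

def pvA (c : Char) : List Char :=
  ((pvRep '^' "hat".toList ∘ pvRep '~' "tilde".toList ∘ pvRep '}' [] ∘ pvRep '{' [] ∘
    pvRep '#' "hash".toList ∘ pvRep '$' "dollar".toList ∘ pvRep '%' "pct".toList ∘
    pvRep '&' "And".toList ∘ pvRep ' ' ['_'] ∘ pvRep '/' ['_'] ∘ pvRep '\\' ['_']) [c]).filter pvKeep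

-- per-character effect of B's single pass
def pvB (c : Char) : List Char :=
  match escTable.get? c with
  | some r => r.toList
  | none => if pvKeep c then [c] else []

theorem pvA_toList (s : String) : (esc_label s).toList = s.toList.flatMap pvA := by
  simp only [esc_label, PySem.Str.toList_replace, PySem.Str.toList_join, List.map_map,
    show ("\\" : String).toList = ['\\'] from rfl, show ("/" : String).toList = ['/'] from rfl,
    show (" " : String).toList = [' '] from rfl, show ("&" : String).toList = ['&'] from rfl,
    show ("%" : String).toList = ['%'] from rfl, show ("$" : String).toList = ['$'] from rfl,
    show ("#" : String).toList = ['#'] from rfl, show ("{" : String).toList = ['{'] from rfl,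
    show ("}" : String).toList = ['}'] from rfl, show ("~" : String).toList = ['~'] from rfl,
    show ("^" : String).toList = ['^'] from rfl, show ("" : String).toList = [] from rfl,
    pv_replace_single]
  rw [show (String.toList ∘ fun c => String.ofList [c]) = (fun c => [c]) from
    funext (fun c => String.toList_ofList)]
  simp only [PySem.Chars.join_nil_singletons]
  simp only [List.filter_flatMap, List.flatMap_assoc]
  apply List.flatMap_congr
  intro c _
  simp only [pvA, pvRep, Function.comp_apply, List.filter_flatMap, List.flatMap_assoc,
    List.flatMap_cons, List.flatMap_nil, List.append_nil]
  rfl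

theorem pvB_toList (s : String) : (esc_label_alt s).toList = s.toList.flatMap pvB := by
  simp only [esc_label_alt]
  have hbody : (fun (acc : List String) (c : Char) =>
      match escTable.get? c with
      | some r => acc ++ [r]
      | none =>
        if PySem.Chars.isalnum c || PySem.Chars.isIn [c] ['_', '-'] then acc ++ [String.ofList [c]]
        else acc)
      = fun acc c => acc ++ (match escTable.get? c with
        | some r => [r]
        | none => if pvKeep c then [String.ofList [c]] else []) := by
    funext acc c
    cases h : escTable.get? c
    · simp only [pvKeep]; split <;> simp
    · simp
  rw [hbody, PySem.List.foldl_append_eq_flatMap, List.nil_append, PySem.Str.toList_join,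
    show ("" : String).toList = [] from rfl, pv_join_nil_flatten, List.flatten_eq_flatMap,
    List.map_flatMap, List.flatMap_assoc]
  refine List.flatMap_congr (fun c _ => ?_)
  cases h : escTable.get? c
  · simp only [pvB, h]
    split <;> simp
  · simp [pvB, h]

set_option maxRecDepth 8192 in
theorem pv_pointwise (c : Char) : pvA c = pvB c := by
  by_cases h1 : c = '\\'; · subst h1; decide
  by_cases h2 : c = '/'; · subst h2; decide
  by_cases h3 : c = ' '; · subst h3; decide
  by_cases h4 : c = '&'; · subst h4; decide
  by_cases h5 : c = '%'; · subst h5; decide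
  by_cases h6 : c = '$'; · subst h6; decide
  by_cases h7 : c = '#'; · subst h7; decide
  by_cases h8 : c = '{'; · subst h8; decide
  by_cases h9 : c = '}'; · subst h9; decide
  by_cases h10 : c = '~'; · subst h10; decide
  by_cases h11 : c = '^'; · subst h11; decide
  have htab : escTable.get? c = none := by
    have he : escTable = PySem.Dict.mk
      [('\\', "_"), ('/', "_"), (' ', "_"), ('&', "And"), ('%', "pct"),
       ('$', "dollar"), ('#', "hash"), ('{', ""), ('}', ""), ('~', "tilde"), ('^', "hat")] := by
      decide
    simp [he, PySem.Dict.get?, Ne.symm h1, Ne.symm h2, Ne.symm h3, Ne.symm h4, Ne.symm h5,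
      Ne.symm h6, Ne.symm h7, Ne.symm h8, Ne.symm h9, Ne.symm h10, Ne.symm h11]
  simp only [pvA, pvB, pvRep, htab, Function.comp_apply, List.flatMap_cons, List.flatMap_nil,
    List.append_nil]
  simp [h1, h2, h3, h4, h5, h6, h7, h8, h9, h10, h11, List.filter]
  cases pvKeep c <;> rfl

-- ===== VERDICT (by name: the statement is the Claim_ definition above) =====
theorem esc_label_spec : Claim_equal_esc_label := by
  intro s _
  unfold Spec_esc_label
  have : (esc_label s).toList = (esc_label_alt s).toList := by
    rw [pvA_toList, pvB_toList]
    exact List.flatMap_congr (fun c _ => pv_pointwise c)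
  calc esc_label s = String.ofList (esc_label s).toList := String.ofList_toList.symm
    _ = String.ofList (esc_label_alt s).toList := by rw [this]
    _ = esc_label_alt s := String.ofList_toList
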